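-- pv_equiv track=rewrite | github.com/aishwarya4444/codeChallenges | Upgrad - Hackerearth/AbsoluteRemoval.py | solve
-- ===== SOURCE A (Python) =====
-- def solve(A,N):
-- 	if N<3:
-- 		return 0
-- 	B=list(A)
-- 	diff=0
-- 	index=0
-- 	_diff=0
-- 	sum=0
-- 	for i in range(N):
-- 		if i==0:
-- 			diff=abs(B[i+1]-B[i])
-- 		elif i==N-1:
-- 			diff=abs(B[i]-B[i-1])
-- 		else:
-- 			diff=abs(B[i]-B[i-1]) + abs(B[i+1]-B[i]) - abs(B[i+1]-B[i-1])
-- 		if diff>_diff: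
-- 			_diff=diff
-- 			index=i
--
-- 	del B[index]
-- 	for i in range(N-2):
-- 		sum = sum+abs(B[i]-B[i+1])
-- 	return sum
-- ===== SOURCE B (Python) =====
-- def solve(A, N):
--     # closed-form: total adjacent-difference sum minus the best removal savings
--     if N < 3:
--         return 0
--     gaps = [abs(y - x) for x, y in zip(A, A[1:N])]
--     total = sum(gaps)
--     savings = [gaps[0]] \
--         + [gaps[i - 1] + gaps[i] - abs(A[i + 1] - A[i - 1]) for i in range(1, N - 1)] \
--         + [gaps[-1]]
--     return total - max(savings)
-- ===== Notes on version B (the rewrite author's own statement) =====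
-- stated objective: simpler
-- what changed: B computes the total adjacent-difference sum once and subtracts the maximum per-index removal savings (closed-form for endpoints and interior indices), instead of A's tracked-argmax followed by deleting that element from a copied list and re-summing the rebuilt list in a second pass.
import Mathlib
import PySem

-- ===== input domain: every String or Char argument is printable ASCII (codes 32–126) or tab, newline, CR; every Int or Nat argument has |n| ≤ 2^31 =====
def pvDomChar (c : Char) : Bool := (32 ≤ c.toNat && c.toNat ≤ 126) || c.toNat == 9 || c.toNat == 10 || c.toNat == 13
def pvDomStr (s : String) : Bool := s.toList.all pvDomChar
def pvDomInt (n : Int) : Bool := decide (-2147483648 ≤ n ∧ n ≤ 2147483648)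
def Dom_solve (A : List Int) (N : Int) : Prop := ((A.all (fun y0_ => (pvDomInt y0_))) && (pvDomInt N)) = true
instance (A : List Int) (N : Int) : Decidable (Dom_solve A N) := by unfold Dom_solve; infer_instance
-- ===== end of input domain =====

-- B replaces A's delete-and-resum with "total adjacent sum minus the best removal savings", computed in
-- closed form per index (objective: simpler — no array rebuild, no second summation pass over a copy).

-- ===== PORT A =====
def solve (A : List Int) (N : Int) : Int :=
  if N < 3 then 0
  else
    -- B = list(A)
    let B := A
    -- first loop: state (diff, _diff, index)
    let st :=
      (PySem.List.pyRange 0 N 1).foldl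
        (fun (st : Int × Int × Int) i =>
          let diff :=
            if i = 0 then
              |PySem.List.pyGetD B (i + 1) 0 - PySem.List.pyGetD B i 0|
            else if i = N - 1 then
              |PySem.List.pyGetD B i 0 - PySem.List.pyGetD B (i - 1) 0|
            else
              |PySem.List.pyGetD B i 0 - PySem.List.pyGetD B (i - 1) 0| +
                |PySem.List.pyGetD B (i + 1) 0 - PySem.List.pyGetD B i 0| -
                |PySem.List.pyGetD B (i + 1) 0 - PySem.List.pyGetD B (i - 1) 0|
          if diff > st.2.1 then (diff, diff, i) else (diff, st.2.1, st.2.2))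
        (0, 0, 0)
    -- del B[index]  (index comes from range(N), hence nonnegative: eraseIdx is exact)
    let B2 := B.eraseIdx st.2.2.toNat
    -- second loop: sum of abs(B2[i]-B2[i+1])
    (PySem.List.pyRange 0 (N - 2) 1).foldl
      (fun s i => s + |PySem.List.pyGetD B2 i 0 - PySem.List.pyGetD B2 (i + 1) 0|) 0

-- ===== PORT B =====
def solve_alt (A : List Int) (N : Int) : Int :=
  if N < 3 then 0
  else
    -- gaps = [abs(y - x) for x, y in zip(A, A[1:N])]
    let gaps := (A.zip (PySem.List.slice A (some 1) (some N))).map (fun p => |p.2 - p.1|)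
    let total := gaps.sum
    -- savings = [gaps[0]] + [gaps[i-1] + gaps[i] - abs(A[i+1] - A[i-1]) for i in range(1, N-1)] + [gaps[-1]]
    let savings :=
      [PySem.List.pyGetD gaps 0 0] ++
        (PySem.List.pyRange 1 (N - 1) 1).map (fun i =>
          PySem.List.pyGetD gaps (i - 1) 0 + PySem.List.pyGetD gaps i 0 -
            |PySem.List.pyGetD A (i + 1) 0 - PySem.List.pyGetD A (i - 1) 0|) ++
        [PySem.List.pyGetD gaps (-1) 0]
    -- max(savings): savings is nonempty, so Python's max never raises
    total - (PySem.List.max? savings (fun x => x)).getD 0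

-- ===== PRECONDITION & SPEC =====
-- When N ≥ 3 the Python A indexes A[0..N-1] (and, after the deletion, up to position N-2),
-- so it raises IndexError iff len(A) < N; for N < 3 it returns 0 for any list.
def Pre_solve (A : List Int) (N : Int) : Prop := 3 ≤ N → N ≤ (A.length : Int)
instance (A : List Int) (N : Int) : Decidable (Pre_solve A N) := by unfold Pre_solve; infer_instance
def pvWitness_solve : List Int × Int := ([1, 5, 2], 3)

def Spec_solve (A : List Int) (N : Int) (out : Int) : Prop := out = solve_alt A N
instance (A : List Int) (N : Int) (out : Int) : Decidable (Spec_solve A N out) := by unfold Spec_solve; infer_instance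

-- ===== CLAIM (what is proved, stated in full; the proofs are below) =====
def Claim_equal_solve : Prop := ∀ (A : List Int) (N : Int), Dom_solve A N → Pre_solve A N → Spec_solve A N (solve A N)

-- ===== LEMMAS AND PROOFS =====

-- gap i: |A[i+1] - A[i]|
def gfun (A : List Int) (i : Nat) : Int := |A.getD (i + 1) 0 - A.getD i 0|
-- savings of removing index k from the first n elements (A's three branches)
def sav (A : List Int) (n : Nat) (k : Nat) : Int :=
  if k = 0 then gfun A 0
  else if k = n - 1 then gfun A (n - 2)
  else gfun A (k - 1) + gfun A k - |A.getD (k + 1) 0 - A.getD (k - 1) 0|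
-- running maximum of sav over range m, started at 0 (A's `_diff` accumulator)
def Msav (A : List Int) (n m : Nat) : Int := ((List.range m).map (sav A n)).foldl max 0
-- total adjacent-difference sum over the first n elements
def Tsum (A : List Int) (n : Nat) : Int := ((List.range (n - 1)).map (gfun A)).sum
-- A's first loop body, on Nat indices
def stepA (A : List Int) (n : Nat) (st : Int × Int × Int) (k : Nat) : Int × Int × Int :=
  (sav A n k, if sav A n k > st.2.1 then (sav A n k, (k : Int)) else st.2)

theorem sav_zero_nonneg (A : List Int) (n : Nat) : 0 ≤ sav A n 0 := by
  simp [sav, gfun, abs_nonneg]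

-- characterization of A's first loop: _diff is the running max, index attains it
theorem loop1_char (A : List Int) (n : Nat) : ∀ m : Nat, 1 ≤ m →
    ∃ j : Nat, j < m ∧
      List.foldl (stepA A n) (0, 0, 0) (List.range m) = (sav A n (m - 1), Msav A n m, (j : Int)) ∧
      sav A n j = Msav A n m := by
  intro m hm
  induction m with
  | zero => omega
  | succ m ih =>
    rcases Nat.eq_or_lt_of_le hm with h1 | h1
    · -- m + 1 = 1
      have hm0 : m = 0 := by omega
      subst hm0
      refine ⟨0, by omega, ?_, ?_⟩ <;>
      · have h0 : (0:Int) ≤ sav A n 0 := sav_zero_nonneg A n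
        simp only [List.range_succ, List.range_zero, List.nil_append, List.foldl_cons,
          List.foldl_nil, stepA, Msav, List.map_cons, List.map_nil]
        by_cases h : sav A n 0 > 0 <;> simp [h] <;> omega
    · have hm1 : 1 ≤ m := by omega
      obtain ⟨j, hj, heq, hjv⟩ := ih hm1
      have hsplit : List.range (m + 1) = List.range m ++ [m] := List.range_succ
      have hM : Msav A n (m + 1) = max (Msav A n m) (sav A n m) := by
        simp [Msav, List.range_succ]
      by_cases hgt : sav A n m > Msav A n m
      · refine ⟨m, by omega, ?_, ?_⟩
        · simp only [hsplit, List.foldl_append, heq, List.foldl_cons, List.foldl_nil, stepA]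
          simp [hgt, hM, max_eq_right (le_of_lt hgt)]
        · rw [hM, max_eq_right (le_of_lt hgt)]
      · refine ⟨j, by omega, ?_, ?_⟩
        · simp only [hsplit, List.foldl_append, heq, List.foldl_cons, List.foldl_nil, stepA]
          simp [hgt, hM, max_eq_left (not_lt.mp hgt)]
        · rw [hM, max_eq_left (not_lt.mp hgt), hjv]

-- getD after eraseIdx
theorem getD_eraseIdx (A : List Int) (j i : Nat) :
    (A.eraseIdx j).getD i 0 = if i < j then A.getD i 0 else A.getD (i + 1) 0 := by
  rw [List.getD_eq_getElem?_getD, List.getElem?_eraseIdx]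
  split <;> rw [List.getD_eq_getElem?_getD]

-- A's second loop (the re-summation after deletion) in closed form: total minus savings
theorem resum_eq (A : List Int) (n j : Nat) (h3 : 3 ≤ n) (_hlen : n ≤ A.length) (hj : j < n) :
    ((List.range (n - 2)).map
        (fun i => |(A.eraseIdx j).getD i 0 - (A.eraseIdx j).getD (i + 1) 0|)).sum
      = Tsum A n - sav A n j := by
  by_cases hj0 : j = 0
  · subst hj0
    have hmap : (List.range (n - 2)).map
          (fun i => |(A.eraseIdx 0).getD i 0 - (A.eraseIdx 0).getD (i + 1) 0|)
        = (List.range (n - 2)).map (fun i => gfun A (1 + i)) := by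
      apply List.map_congr_left
      intro i _
      rw [getD_eraseIdx, getD_eraseIdx, if_neg (by omega), if_neg (by omega), gfun]
      rw [abs_sub_comm, show (1 + i) + 1 = i + 1 + 1 by omega, show 1 + i = i + 1 by omega]
    rw [hmap, Tsum, show n - 1 = 1 + (n - 2) by omega, List.range_add, List.map_append,
      List.sum_append, sav, if_pos rfl]
    simp [List.map_map, Function.comp_def]
  · by_cases hjl : j = n - 1
    · have hmap : (List.range (n - 2)).map
            (fun i => |(A.eraseIdx j).getD i 0 - (A.eraseIdx j).getD (i + 1) 0|)
          = (List.range (n - 2)).map (gfun A) := by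
        apply List.map_congr_left
        intro i hi
        have hi' : i < n - 2 := List.mem_range.mp hi
        rw [getD_eraseIdx, getD_eraseIdx, if_pos (by omega), if_pos (by omega), gfun,
          abs_sub_comm]
      rw [hmap, Tsum, show n - 1 = (n - 2) + 1 by omega, List.range_succ, List.map_append,
        List.sum_append, sav, if_neg hj0, if_pos hjl]
      simp
    · -- interior: set m := j - 1
      obtain ⟨m, rfl⟩ : ∃ m, j = m + 1 := ⟨j - 1, by omega⟩
      have hm2 : m + 1 ≤ n - 2 := by omega
      set r := n - 3 - m with hr
      have hmap : (List.range (n - 2)).map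
            (fun i => |(A.eraseIdx (m+1)).getD i 0 - (A.eraseIdx (m+1)).getD (i + 1) 0|)
          = (List.range m).map (gfun A) ++ [|A.getD m 0 - A.getD (m + 2) 0|]
            ++ (List.range r).map (fun k => gfun A (m + 2 + k)) := by
        rw [show n - 2 = (m + 1) + r by omega, List.range_add, List.range_succ,
          List.map_append, List.map_append, List.map_map]
        congr 1
        · congr 1
          · apply List.map_congr_left
            intro i hi
            have hi' : i < m := List.mem_range.mp hi
            rw [getD_eraseIdx, getD_eraseIdx, if_pos (by omega), if_pos (by omega), gfun,
              abs_sub_comm]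
          · simp only [List.map_cons, List.map_nil]
            rw [getD_eraseIdx, getD_eraseIdx, if_pos (by omega), if_neg (by omega)]
        · apply List.map_congr_left
          intro k _
          simp only [Function.comp_def]
          rw [getD_eraseIdx, getD_eraseIdx, if_neg (by omega), if_neg (by omega), gfun,
            abs_sub_comm, show m + 1 + k + 1 + 1 = (m + 2 + k) + 1 by omega,
            show m + 1 + k + 1 = m + 2 + k by omega]
      have hT : Tsum A n = ((List.range m).map (gfun A)).sum + gfun A m + gfun A (m + 1)
          + ((List.range r).map (fun k => gfun A (m + 2 + k))).sum := by
        rw [Tsum, show n - 1 = (m + 2) + r by omega, List.range_add, List.map_append,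
          List.sum_append, show m + 2 = (m + 1) + 1 by omega, List.range_succ, List.range_succ,
          List.map_append, List.map_append, List.sum_append, List.sum_append, List.map_map]
        simp only [List.map_cons, List.map_nil, List.sum_cons, List.sum_nil,
          Function.comp_def]
        ring
      have hs : sav A n (m + 1) = gfun A m + gfun A (m + 1) - |A.getD (m + 2) 0 - A.getD m 0| := by
        rw [sav, if_neg hj0, if_neg hjl]
        norm_num
      rw [hmap, hT, hs, List.sum_append, List.sum_append]
      simp [abs_sub_comm]
      ring

theorem solveA_eq (A : List Int) (n : Nat) (h3 : 3 ≤ n) (hlen : n ≤ A.length) :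
    solve A (n : Int) = Tsum A n - Msav A n n := by
  have hnot : ¬ ((n:Int) < 3) := by omega
  obtain ⟨j, hjn, heq, hjv⟩ := loop1_char A n n (by omega)
  have hstep : ∀ (st : Int × Int × Int), ∀ k ∈ List.range n,
      (fun (st : Int × Int × Int) (k : Nat) =>
        (fun (st : Int × Int × Int) (i : Int) =>
          if (if i = 0 then |PySem.List.pyGetD A (i + 1) 0 - PySem.List.pyGetD A i 0|
              else if i = (n:Int) - 1 then |PySem.List.pyGetD A i 0 - PySem.List.pyGetD A (i - 1) 0|
              else |PySem.List.pyGetD A i 0 - PySem.List.pyGetD A (i - 1) 0| +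
                  |PySem.List.pyGetD A (i + 1) 0 - PySem.List.pyGetD A i 0| -
                  |PySem.List.pyGetD A (i + 1) 0 - PySem.List.pyGetD A (i - 1) 0|) > st.2.1
          then
            ((if i = 0 then |PySem.List.pyGetD A (i + 1) 0 - PySem.List.pyGetD A i 0|
              else if i = (n:Int) - 1 then |PySem.List.pyGetD A i 0 - PySem.List.pyGetD A (i - 1) 0|
              else |PySem.List.pyGetD A i 0 - PySem.List.pyGetD A (i - 1) 0| +
                  |PySem.List.pyGetD A (i + 1) 0 - PySem.List.pyGetD A i 0| -
                  |PySem.List.pyGetD A (i + 1) 0 - PySem.List.pyGetD A (i - 1) 0|),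
             (if i = 0 then |PySem.List.pyGetD A (i + 1) 0 - PySem.List.pyGetD A i 0|
              else if i = (n:Int) - 1 then |PySem.List.pyGetD A i 0 - PySem.List.pyGetD A (i - 1) 0|
              else |PySem.List.pyGetD A i 0 - PySem.List.pyGetD A (i - 1) 0| +
                  |PySem.List.pyGetD A (i + 1) 0 - PySem.List.pyGetD A i 0| -
                  |PySem.List.pyGetD A (i + 1) 0 - PySem.List.pyGetD A (i - 1) 0|), i)
          else
            ((if i = 0 then |PySem.List.pyGetD A (i + 1) 0 - PySem.List.pyGetD A i 0|
              else if i = (n:Int) - 1 then |PySem.List.pyGetD A i 0 - PySem.List.pyGetD A (i - 1) 0|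
              else |PySem.List.pyGetD A i 0 - PySem.List.pyGetD A (i - 1) 0| +
                  |PySem.List.pyGetD A (i + 1) 0 - PySem.List.pyGetD A i 0| -
                  |PySem.List.pyGetD A (i + 1) 0 - PySem.List.pyGetD A (i - 1) 0|), st.2.1, st.2.2)) st (k : Int))
        st k = stepA A n st k := by
    intro st k hk
    have hkn : k < n := List.mem_range.mp hk
    simp only []
    have hdiff : (if (k:Int) = 0 then
              |PySem.List.pyGetD A ((k:Int) + 1) 0 - PySem.List.pyGetD A (k:Int) 0|
            else if (k:Int) = (n:Int) - 1 then
              |PySem.List.pyGetD A (k:Int) 0 - PySem.List.pyGetD A ((k:Int) - 1) 0|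
            else
              |PySem.List.pyGetD A (k:Int) 0 - PySem.List.pyGetD A ((k:Int) - 1) 0| +
                |PySem.List.pyGetD A ((k:Int) + 1) 0 - PySem.List.pyGetD A (k:Int) 0| -
                |PySem.List.pyGetD A ((k:Int) + 1) 0 - PySem.List.pyGetD A ((k:Int) - 1) 0|)
        = sav A n k := by
      by_cases hk0 : k = 0
      · subst hk0
        rw [if_pos (by norm_num : ((0:Nat):Int) = 0)]
        simp only [sav, gfun]
        rw [show (((0:Nat)):Int) + 1 = ((1:Nat):Int) by norm_num, PySem.List.pyGetD_natCast,
          show (((0:Nat)):Int) = (0:Int) by norm_num, PySem.List.pyGetD_zero]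
        simp
      · have hc0 : ¬ ((k:Int) = 0) := by exact_mod_cast hk0
        have e1 : (k:Int) + 1 = ((k+1 : Nat) : Int) := by push_cast; ring
        have e2 : (k:Int) - 1 = ((k-1 : Nat) : Int) := by omega
        by_cases hklast : k = n - 1
        · have hcl : (k:Int) = (n:Int) - 1 := by omega
          rw [if_neg hc0, if_pos hcl, e2, PySem.List.pyGetD_natCast, PySem.List.pyGetD_natCast]
          simp only [sav, if_neg hk0, if_pos hklast, gfun]
          rw [show k - 1 = n - 2 by omega, show (n - 2) + 1 = k by omega]
        · have hcl : ¬ ((k:Int) = (n:Int) - 1) := by omega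
          rw [if_neg hc0, if_neg hcl, e1, e2]
          simp only [PySem.List.pyGetD_natCast]
          simp only [sav, if_neg hk0, if_neg hklast, gfun]
          rw [show (k - 1) + 1 = k by omega]
    rw [hdiff]
    simp only [stepA]
    by_cases h : sav A n k > st.2.1 <;> simp [h]
  have hA : List.foldl
        (fun (st : Int × Int × Int) (i : Int) =>
          if (if i = 0 then |PySem.List.pyGetD A (i + 1) 0 - PySem.List.pyGetD A i 0|
              else if i = (n:Int) - 1 then |PySem.List.pyGetD A i 0 - PySem.List.pyGetD A (i - 1) 0|
              else |PySem.List.pyGetD A i 0 - PySem.List.pyGetD A (i - 1) 0| +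
                  |PySem.List.pyGetD A (i + 1) 0 - PySem.List.pyGetD A i 0| -
                  |PySem.List.pyGetD A (i + 1) 0 - PySem.List.pyGetD A (i - 1) 0|) > st.2.1
          then
            ((if i = 0 then |PySem.List.pyGetD A (i + 1) 0 - PySem.List.pyGetD A i 0|
              else if i = (n:Int) - 1 then |PySem.List.pyGetD A i 0 - PySem.List.pyGetD A (i - 1) 0|
              else |PySem.List.pyGetD A i 0 - PySem.List.pyGetD A (i - 1) 0| +
                  |PySem.List.pyGetD A (i + 1) 0 - PySem.List.pyGetD A i 0| -
                  |PySem.List.pyGetD A (i + 1) 0 - PySem.List.pyGetD A (i - 1) 0|),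
             (if i = 0 then |PySem.List.pyGetD A (i + 1) 0 - PySem.List.pyGetD A i 0|
              else if i = (n:Int) - 1 then |PySem.List.pyGetD A i 0 - PySem.List.pyGetD A (i - 1) 0|
              else |PySem.List.pyGetD A i 0 - PySem.List.pyGetD A (i - 1) 0| +
                  |PySem.List.pyGetD A (i + 1) 0 - PySem.List.pyGetD A i 0| -
                  |PySem.List.pyGetD A (i + 1) 0 - PySem.List.pyGetD A (i - 1) 0|), i)
          else
            ((if i = 0 then |PySem.List.pyGetD A (i + 1) 0 - PySem.List.pyGetD A i 0|
              else if i = (n:Int) - 1 then |PySem.List.pyGetD A i 0 - PySem.List.pyGetD A (i - 1) 0|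
              else |PySem.List.pyGetD A i 0 - PySem.List.pyGetD A (i - 1) 0| +
                  |PySem.List.pyGetD A (i + 1) 0 - PySem.List.pyGetD A i 0| -
                  |PySem.List.pyGetD A (i + 1) 0 - PySem.List.pyGetD A (i - 1) 0|), st.2.1, st.2.2))
        (0, 0, 0) (PySem.List.pyRange 0 (n:Int) 1)
      = (sav A n (n - 1), Msav A n n, (j : Int)) := by
    rw [PySem.List.pyRange_zero_natCast]
    refine Eq.trans List.foldl_map ?_
    rw [PySem.List.foldl_congr_mem _ _ (stepA A n) _ (fun st k hk => hstep st k hk)]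
    exact heq
  simp only [solve, if_neg hnot]
  rw [hA]
  simp only [Int.toNat_natCast]
  have e2 : (n:Int) - 2 = ((n-2 : Nat) : Int) := by omega
  rw [e2, PySem.List.pyRange_zero_natCast]
  refine Eq.trans List.foldl_map ?_
  have hstep2 : ∀ (s : Int), ∀ k ∈ List.range (n-2),
      (fun (x : Int) (y : Nat) => x + |PySem.List.pyGetD (A.eraseIdx j) (y:Int) 0 -
          PySem.List.pyGetD (A.eraseIdx j) ((y:Int) + 1) 0|) s k
      = (fun (x : Int) (y : Nat) => x + |(A.eraseIdx j).getD y 0 - (A.eraseIdx j).getD (y+1) 0|) s k := by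
    intro s k _
    simp only []
    rw [show (k:Int) + 1 = ((k+1 : Nat) : Int) by push_cast; ring,
      PySem.List.pyGetD_natCast, PySem.List.pyGetD_natCast]
  rw [PySem.List.foldl_congr_mem _ _ _ _ hstep2]
  rw [PySem.List.foldl_add, resum_eq A n j h3 hlen hjn, hjv]
  ring

theorem solveB_eq (A : List Int) (n : Nat) (h3 : 3 ≤ n) (hlen : n ≤ A.length) :
    solve_alt A (n : Int) = Tsum A n - Msav A n n := by
  have hnot : ¬ ((n:Int) < 3) := by omega
  simp only [solve_alt, if_neg hnot]
  have hgaps : (A.zip (PySem.List.slice A (some 1) (some (n:Int)))).map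
        (fun p => |p.2 - p.1|) = (List.range (n - 1)).map (gfun A) := by
    rw [PySem.List.slice_toNat A (by norm_num) (by positivity),
      show ((1:Int)).toNat = 1 from rfl, show ((n:Int)).toNat = n by omega]
    apply List.ext_getElem
    · simp
      omega
    · intro i h1 h2
      simp only [List.length_map, List.length_zip, List.length_take, List.length_drop,
        List.length_range, lt_min_iff] at h1 h2
      simp only [List.getElem_map, List.getElem_zip, List.getElem_take, List.getElem_drop,
        List.getElem_range]
      rw [gfun, List.getD_eq_getElem _ _ (by omega), List.getD_eq_getElem _ _ (by omega)]
      simp [Nat.add_comm]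
  rw [hgaps]
  -- head element
  have hhead : PySem.List.pyGetD ((List.range (n - 1)).map (gfun A)) 0 0 = sav A n 0 := by
    rw [PySem.List.pyGetD_zero, PySem.List.getD_map_range _ _ _ _ (by omega), sav, if_pos rfl]
  -- last element
  have hlast : PySem.List.pyGetD ((List.range (n - 1)).map (gfun A)) (-1) 0 = sav A n (n - 1) := by
    have hne : ((List.range (n - 1)).map (gfun A)) ≠ [] := by simp; omega
    rw [PySem.List.pyGetD_neg_one _ _ hne, List.getLast_eq_getElem]
    simp only [List.getElem_map, List.getElem_range, List.length_map, List.length_range]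
    rw [show n - 1 - 1 = n - 2 by omega, sav, if_neg (by omega), if_pos rfl]
  -- middle elements
  have hmid : (PySem.List.pyRange 1 ((n:Int) - 1) 1).map (fun i =>
        PySem.List.pyGetD ((List.range (n - 1)).map (gfun A)) (i - 1) 0 +
          PySem.List.pyGetD ((List.range (n - 1)).map (gfun A)) i 0 -
          |PySem.List.pyGetD A (i + 1) 0 - PySem.List.pyGetD A (i - 1) 0|)
      = (List.range (n - 2)).map (fun k => sav A n (k + 1)) := by
    rw [PySem.List.pyRange_one, List.map_map]
    rw [show ((n:Int) - 1 - 1).toNat = n - 2 by omega]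
    apply List.map_congr_left
    intro k hk
    have hkr : k < n - 2 := List.mem_range.mp hk
    simp only [Function.comp_def]
    rw [show (1:Int) + (k:Int) - 1 = ((k:Nat):Int) by ring,
      show (1:Int) + (k:Int) = (((k+1:Nat)):Int) by push_cast; ring]
    rw [show (((k+1:Nat)):Int) + 1 = (((k+2:Nat)):Int) by push_cast; ring]
    simp only [PySem.List.pyGetD_natCast]
    rw [PySem.List.getD_map_range _ _ _ _ (by omega), PySem.List.getD_map_range _ _ _ _ (by omega)]
    rw [sav, if_neg (by omega), if_neg (by omega)]
    norm_num
  rw [hhead, hlast, hmid]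
  -- savings list = map sav over range n
  have hsavlist : (List.range n).map (sav A n)
      = sav A n 0 :: ((List.range (n - 2)).map (fun k => sav A n (k + 1)) ++ [sav A n (n - 1)]) := by
    rw [show List.range n = List.range ((n - 2) + 1 + 1) by congr 1; omega,
      List.range_succ, List.range_succ_eq_map, List.map_append, List.map_cons, List.map_map]
    rw [show (n - 2) + 1 = n - 1 by omega]
    simp [Function.comp_def]
  -- max? of the cons
  rw [show [sav A n 0] ++ (List.range (n - 2)).map (fun k => sav A n (k + 1)) ++ [sav A n (n - 1)]
      = sav A n 0 :: ((List.range (n - 2)).map (fun k => sav A n (k + 1)) ++ [sav A n (n - 1)]) by simp]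
  rw [PySem.List.max?_id_cons]
  simp only [Option.getD_some]
  -- foldl max from sav 0 equals Msav
  have h0 : (0:Int) ≤ sav A n 0 := by simp [sav, gfun, abs_nonneg]
  have : Msav A n n = List.foldl max (sav A n 0)
      ((List.range (n - 2)).map (fun k => sav A n (k + 1)) ++ [sav A n (n - 1)]) := by
    rw [Msav, hsavlist, List.foldl_cons, max_eq_right h0]
  rw [this, Tsum]

theorem solve_spec : Claim_equal_solve := by
  intro A N _ hpre
  unfold Spec_solve
  by_cases hlt : N < 3
  · simp only [solve, solve_alt, if_pos hlt]
  · have h3 : 3 ≤ N := by omega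
    obtain ⟨n, rfl⟩ : ∃ n : Nat, N = (n : Int) := ⟨N.toNat, (Int.toNat_of_nonneg (by omega)).symm⟩
    have hn3 : 3 ≤ n := by exact_mod_cast h3
    have hlen : n ≤ A.length := by exact_mod_cast hpre h3
    rw [solveA_eq A n hn3 hlen, solveB_eq A n hn3 hlen]
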